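-- pv_equiv track=rewrite | github.com/harveyxia/semantic_classification | cluster.py | get_cluster_members
-- ===== SOURCE A (Python) =====
-- def get_cluster_members(i, clustering, synset_list):
--     members = []
--     if i >= len(synset_list):
--         i = i-len(synset_list)
--         l = int(clustering[i][0])
--         r = int(clustering[i][1])
--         # if r < len(synset_list):
--         #     members.append(synset_list[r])
--         # else:
--         members.extend(get_cluster_members(r, clustering, synset_list))
--
--         # if l < len(synset_list):
--         #     members.append(synset_list[l])
--         # else:
--         members.extend(get_cluster_members(l, clustering, synset_list))
--     else:
--         members.append(synset_list[i])
--     return members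
-- ===== SOURCE B (Python) =====
-- def get_cluster_members(i, clustering, synset_list):
--     # Iterative DFS with an explicit stack instead of recursion.
--     n = len(synset_list)
--     members = []
--     stack = [i]
--     while stack:
--         j = stack.pop()
--         if j < n:
--             members.append(synset_list[j])
--         else:
--             k = j - n
--             # push left first so the right child is popped (and emitted) first
--             stack.append(int(clustering[k][0]))
--             stack.append(int(clustering[k][1]))
--     return members
-- ===== Notes on version B (the rewrite author's own statement) =====
-- stated objective: alternative
-- what changed: Replaces the recursive tree walk by an iterative depth-first traversal with an explicit stack (left child pushed before right so the right subtree is still emitted first), avoiding Python's recursion-depth limit.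
-- outside the precondition, e.g. on get_cluster_members(1, [[2, 0], [0, 0]], ['a']): A returns ['a', 'a', 'a'], B returns ['a', 'a', 'a']
import Mathlib
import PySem

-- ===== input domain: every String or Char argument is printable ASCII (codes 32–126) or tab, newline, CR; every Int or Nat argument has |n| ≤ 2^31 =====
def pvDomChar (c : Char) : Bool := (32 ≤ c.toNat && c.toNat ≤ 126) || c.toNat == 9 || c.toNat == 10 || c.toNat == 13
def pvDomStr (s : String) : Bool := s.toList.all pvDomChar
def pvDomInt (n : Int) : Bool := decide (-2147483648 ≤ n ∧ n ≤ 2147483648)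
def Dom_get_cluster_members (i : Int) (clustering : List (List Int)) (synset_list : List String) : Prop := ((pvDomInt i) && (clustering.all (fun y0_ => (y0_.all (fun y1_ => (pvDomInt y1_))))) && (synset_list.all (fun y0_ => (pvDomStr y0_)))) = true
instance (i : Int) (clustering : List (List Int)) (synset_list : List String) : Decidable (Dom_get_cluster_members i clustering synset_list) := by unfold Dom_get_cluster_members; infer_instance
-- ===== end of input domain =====

-- B replaces A's recursion by an iterative depth-first traversal with an explicit stack
-- (left child pushed before right, so the right subtree is still emitted first).

-- ===== PORT A =====
-- A's recursion, with a fuel counter making it total; inside Pre_ the recursion depth is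
-- bounded by the number of clustering rows, so the top-level fuel below never runs out.
def pvARec (fuel : Nat) (i : Int) (clustering : List (List Int)) (synset_list : List String) : List String :=
  match fuel with
  | 0 => []
  | fuel + 1 =>
    if i ≥ (synset_list.length : Int) then
      -- i = i - len(synset_list); l = clustering[i][0]; r = clustering[i][1]
      match PySem.List.pyGet? clustering (i - (synset_list.length : Int)) with
      | none => []   -- IndexError, outside Pre_
      | some row =>
        match PySem.List.pyGet? row 0, PySem.List.pyGet? row 1 with
        | some l, some r =>
            pvARec fuel r clustering synset_list ++ pvARec fuel l clustering synset_list
        | _, _ => []   -- IndexError, outside Pre_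
    else
      match PySem.List.pyGet? synset_list i with
      | some s => [s]
      | none => []     -- IndexError, outside Pre_

def get_cluster_members (i : Int) (clustering : List (List Int)) (synset_list : List String) : List String :=
  pvARec (clustering.length + 1) i clustering synset_list

-- ===== PORT B =====
-- B's while-loop on the explicit stack (top of stack = head of the list), with a fuel
-- counter making it total; inside Pre_ the loop terminates well within the fuel below.
def pvBLoop (fuel : Nat) (stack : List Int) (members : List String) (clustering : List (List Int)) (synset_list : List String) : List String :=
  match fuel, stack with
  | _, [] => members
  | 0, _ :: _ => members
  | fuel + 1, j :: rest =>
    if j < (synset_list.length : Int) then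
      match PySem.List.pyGet? synset_list j with
      | some s => pvBLoop fuel rest (members ++ [s]) clustering synset_list
      | none => members   -- IndexError, outside Pre_
    else
      match PySem.List.pyGet? clustering (j - (synset_list.length : Int)) with
      | none => members   -- IndexError, outside Pre_
      | some row =>
        match PySem.List.pyGet? row 0, PySem.List.pyGet? row 1 with
        | some l, some r => pvBLoop fuel (r :: l :: rest) members clustering synset_list
        | _, _ => members -- IndexError, outside Pre_

def get_cluster_members_alt (i : Int) (clustering : List (List Int)) (synset_list : List String) : List String :=
  pvBLoop (3 ^ (clustering.length + 1)) [i] [] clustering synset_list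

-- ===== PRECONDITION & SPEC =====
-- Pre_ excludes malformed dendrograms: a start index outside [-len(synset_list),
-- len(synset_list)+len(clustering)), a relevant row with fewer than two entries, or a
-- relevant row whose child references are out of range or not strictly below the row's
-- own node id — on such inputs A raises IndexError or RecursionError, or (for a forward
-- reference that still happens to terminate) returns a value B also returns.
def Pre_get_cluster_members (i : Int) (clustering : List (List Int)) (synset_list : List String) : Prop :=
  -(synset_list.length : Int) ≤ i ∧ i < (synset_list.length : Int) + clustering.length ∧
  ∀ k : Nat, k < clustering.length → (k : Int) ≤ i - (synset_list.length : Int) →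
    2 ≤ (clustering.getD k []).length ∧
    (∀ c ∈ [(clustering.getD k []).getD 0 0, (clustering.getD k []).getD 1 0],
      -(synset_list.length : Int) ≤ c ∧ c < (synset_list.length : Int) + k)

instance (i : Int) (clustering : List (List Int)) (synset_list : List String) : Decidable (Pre_get_cluster_members i clustering synset_list) := by unfold Pre_get_cluster_members; infer_instance

def pvWitness_get_cluster_members : Int × List (List Int) × List String :=
  (4, [[0, 1], [2, 4]], ["a", "b", "c", "d"])

def Spec_get_cluster_members (i : Int) (clustering : List (List Int)) (synset_list : List String) (out : List String) : Prop := out = get_cluster_members_alt i clustering synset_list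
instance (i : Int) (clustering : List (List Int)) (synset_list : List String) (out : List String) : Decidable (Spec_get_cluster_members i clustering synset_list out) := by unfold Spec_get_cluster_members; infer_instance

-- ===== CLAIM (what is proved, stated in full; the proofs are below) =====
def Claim_equal_get_cluster_members : Prop := ∀ (i : Int) (clustering : List (List Int)) (synset_list : List String), Dom_get_cluster_members i clustering synset_list → Pre_get_cluster_members i clustering synset_list → Spec_get_cluster_members i clustering synset_list (get_cluster_members i clustering synset_list)

-- ===== LEMMAS AND PROOFS =====

-- rank of a node: 0 for leaves, (cluster row index)+1 for internal nodes
def pvRank (i : Int) (synset_list : List String) : Nat :=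
  if i < (synset_list.length : Int) then 0 else (i - (synset_list.length : Int)).toNat + 1

theorem pre_child {i c : Int} {clustering : List (List Int)} {synset_list : List String}
    (hp : Pre_get_cluster_members i clustering synset_list)
    (_hi : (synset_list.length : Int) ≤ i)
    (hc : -(synset_list.length : Int) ≤ c ∧ c < i) :
    Pre_get_cluster_members c clustering synset_list := by
  obtain ⟨h1, h2, h3⟩ := hp
  refine ⟨hc.1, by omega, ?_⟩
  intro k hk hkc
  exact h3 k hk (by omega)

theorem rank_child_le {i c : Int} {synset_list : List String}
    (_hi : (synset_list.length : Int) ≤ i) (hc : c < i) :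
    pvRank c synset_list ≤ (i - (synset_list.length : Int)).toNat := by
  unfold pvRank; split <;> omega

-- under Pre_, A's recursion stabilizes as soon as fuel exceeds the node's rank
theorem pvARec_stable (n : Nat) : ∀ (i : Int) (clustering : List (List Int)) (synset_list : List String) (f1 f2 : Nat),
    Pre_get_cluster_members i clustering synset_list →
    pvRank i synset_list ≤ n → pvRank i synset_list < f1 → pvRank i synset_list < f2 →
    pvARec f1 i clustering synset_list = pvARec f2 i clustering synset_list := by
  induction n with
  | zero =>
    intro i cl sl f1 f2 hp hn h1 h2
    obtain ⟨a, rfl⟩ : ∃ a, f1 = a + 1 := ⟨f1 - 1, by omega⟩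
    obtain ⟨b, rfl⟩ : ∃ b, f2 = b + 1 := ⟨f2 - 1, by omega⟩
    have hleaf : i < (sl.length : Int) := by
      by_contra h; simp [pvRank, h] at hn
    simp [pvARec, not_le.mpr hleaf]
  | succ n ih =>
    intro i cl sl f1 f2 hp hn h1 h2
    obtain ⟨a, rfl⟩ : ∃ a, f1 = a + 1 := ⟨f1 - 1, by omega⟩
    obtain ⟨b, rfl⟩ : ∃ b, f2 = b + 1 := ⟨f2 - 1, by omega⟩
    by_cases hleaf : i < (sl.length : Int)
    · simp [pvARec, not_le.mpr hleaf]
    · have hge : i ≥ (sl.length : Int) := not_lt.mp hleaf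
      obtain ⟨hlb, hub, hrows⟩ := hp
      set k : Nat := (i - (sl.length : Int)).toNat with hk
      have hkC : k < cl.length := by omega
      have hkI : (k : Int) = i - (sl.length : Int) := by omega
      have hrow := hrows k hkC (by omega)
      have hget : PySem.List.pyGet? cl (i - (sl.length : Int)) = some (cl.getD k []) := by
        rw [← hkI, PySem.List.pyGet?_natCast]
        simp [List.getD, List.getElem?_eq_getElem hkC]
      set row := cl.getD k [] with hrowdef
      have hlen : 2 ≤ row.length := hrow.1
      have hget0 : PySem.List.pyGet? row 0 = some (row.getD 0 0) := by
        have : PySem.List.pyGet? row ((0:Nat) : Int) = row[(0:Nat)]? := PySem.List.pyGet?_natCast row 0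
        simp at this
        rw [this, List.getElem?_eq_getElem (by omega)]
        simp [List.getD, List.getElem?_eq_getElem (show 0 < row.length by omega)]
      have hget1 : PySem.List.pyGet? row 1 = some (row.getD 1 0) := by
        have : PySem.List.pyGet? row ((1:Nat) : Int) = row[(1:Nat)]? := PySem.List.pyGet?_natCast row 1
        simp at this
        rw [this, List.getElem?_eq_getElem (by omega)]
        simp [List.getD, List.getElem?_eq_getElem (show 1 < row.length by omega)]
      have hrank : pvRank i sl = k + 1 := by unfold pvRank; split <;> omega
      have hl := hrow.2 (row.getD 0 0) (by simp)
      have hr := hrow.2 (row.getD 1 0) (by simp)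
      have hli : row.getD 0 0 < i := by omega
      have hri : row.getD 1 0 < i := by omega
      have hlp := pre_child ⟨hlb, hub, hrows⟩ hge ⟨hl.1, hli⟩
      have hrp := pre_child ⟨hlb, hub, hrows⟩ hge ⟨hr.1, hri⟩
      have hlr : pvRank (row.getD 0 0) sl ≤ k := by have := rank_child_le hge hli; omega
      have hrr : pvRank (row.getD 1 0) sl ≤ k := by have := rank_child_le hge hri; omega
      rw [hrank] at hn h1 h2
      show pvARec (a+1) i cl sl = pvARec (b+1) i cl sl
      simp only [pvARec, if_pos hge, hget, hget0, hget1]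
      rw [ih (row.getD 1 0) cl sl a b hrp (by omega) (by omega) (by omega),
          ih (row.getD 0 0) cl sl a b hlp (by omega) (by omega) (by omega)]

-- the canonical value of a node's member list
def pvS (i : Int) (clustering : List (List Int)) (synset_list : List String) : List String :=
  pvARec (pvRank i synset_list + 1) i clustering synset_list

theorem pvS_leaf {i : Int} (clustering : List (List Int)) {synset_list : List String}
    (hleaf : i < (synset_list.length : Int)) :
    pvS i clustering synset_list =
      match PySem.List.pyGet? synset_list i with
      | some s => [s]
      | none => [] := by
  simp [pvS, pvARec, not_le.mpr hleaf]

-- total fuel needed by B's loop for a stack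
def pvPhi (stack : List Int) (synset_list : List String) : Nat :=
  (stack.map (fun j => 3 ^ pvRank j synset_list)).sum

theorem pvPhi_cons (x : Int) (s : List Int) (synset_list : List String) :
    pvPhi (x :: s) synset_list = 3 ^ pvRank x synset_list + pvPhi s synset_list := by
  simp [pvPhi]

theorem pvARec_succ (fuel : Nat) (i : Int) (clustering : List (List Int)) (synset_list : List String) :
    pvARec (fuel + 1) i clustering synset_list =
      if i ≥ (synset_list.length : Int) then
        match PySem.List.pyGet? clustering (i - (synset_list.length : Int)) with
        | none => []
        | some row =>
          match PySem.List.pyGet? row 0, PySem.List.pyGet? row 1 with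
          | some l, some r =>
              pvARec fuel r clustering synset_list ++ pvARec fuel l clustering synset_list
          | _, _ => []
      else
        match PySem.List.pyGet? synset_list i with
        | some s => [s]
        | none => [] := rfl

theorem pvBLoop_spec (fuel : Nat) : ∀ (stack : List Int) (acc : List String) (clustering : List (List Int)) (synset_list : List String),
    (∀ j ∈ stack, Pre_get_cluster_members j clustering synset_list) →
    pvPhi stack synset_list ≤ fuel →
    pvBLoop fuel stack acc clustering synset_list =
      acc ++ (stack.map (fun j => pvS j clustering synset_list)).flatten := by
  induction fuel with
  | zero =>
    intro stack acc cl sl hpre hphi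
    cases stack with
    | nil => simp [pvBLoop]
    | cons j rest =>
      exfalso
      have : 1 ≤ 3 ^ pvRank j sl := Nat.one_le_pow _ _ (by omega)
      rw [pvPhi_cons] at hphi; omega
  | succ fuel ih =>
    intro stack acc cl sl hpre hphi
    cases stack with
    | nil => simp [pvBLoop]
    | cons j rest =>
      have hpj := hpre j (by simp)
      by_cases hleaf : j < (sl.length : Int)
      · obtain ⟨h1, h2, h3⟩ := hpj
        have hsome : ∃ s, PySem.List.pyGet? sl j = some s := by
          rcases h : PySem.List.pyGet? sl j with _ | s
          · rw [PySem.List.pyGet?_eq_none_iff] at h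
            exact absurd (by constructor <;> omega) h
          · exact ⟨s, rfl⟩
        obtain ⟨s, hs⟩ := hsome
        have hrank : pvRank j sl = 0 := by simp [pvRank, hleaf]
        have hphirest : pvPhi rest sl ≤ fuel := by
          rw [pvPhi_cons, hrank] at hphi; simp at hphi; omega
        simp only [pvBLoop, if_pos hleaf, hs]
        rw [ih rest (acc ++ [s]) cl sl (fun j hj => hpre j (by simp [hj])) hphirest]
        have hSj : pvS j cl sl = [s] := by rw [pvS_leaf cl hleaf, hs]
        simp [hSj]
      · have hge : j ≥ (sl.length : Int) := not_lt.mp hleaf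
        obtain ⟨hlb, hub, hrows⟩ := hpj
        set k : Nat := (j - (sl.length : Int)).toNat with hk
        have hkC : k < cl.length := by omega
        have hrow := hrows k hkC (by omega)
        have hget : PySem.List.pyGet? cl (j - (sl.length : Int)) = some (cl.getD k []) := by
          have hkI : (k : Int) = j - (sl.length : Int) := by omega
          rw [← hkI, PySem.List.pyGet?_natCast]
          simp [List.getD, List.getElem?_eq_getElem hkC]
        set row := cl.getD k [] with hrowdef
        have hlen : 2 ≤ row.length := hrow.1
        have hget0 : PySem.List.pyGet? row 0 = some (row.getD 0 0) := by
          have : PySem.List.pyGet? row ((0:Nat) : Int) = row[(0:Nat)]? := PySem.List.pyGet?_natCast row 0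
          simp at this
          rw [this, List.getElem?_eq_getElem (by omega)]
          simp [List.getD, List.getElem?_eq_getElem (show 0 < row.length by omega)]
        have hget1 : PySem.List.pyGet? row 1 = some (row.getD 1 0) := by
          have : PySem.List.pyGet? row ((1:Nat) : Int) = row[(1:Nat)]? := PySem.List.pyGet?_natCast row 1
          simp at this
          rw [this, List.getElem?_eq_getElem (by omega)]
          simp [List.getD, List.getElem?_eq_getElem (show 1 < row.length by omega)]
        have hl := hrow.2 (row.getD 0 0) (by simp)
        have hr := hrow.2 (row.getD 1 0) (by simp)
        have hli : row.getD 0 0 < j := by omega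
        have hri : row.getD 1 0 < j := by omega
        have hlp := pre_child ⟨hlb, hub, hrows⟩ hge ⟨hl.1, hli⟩
        have hrp := pre_child ⟨hlb, hub, hrows⟩ hge ⟨hr.1, hri⟩
        have hlr : pvRank (row.getD 0 0) sl ≤ k := by have := rank_child_le hge hli; omega
        have hrr : pvRank (row.getD 1 0) sl ≤ k := by have := rank_child_le hge hri; omega
        have hrank : pvRank j sl = k + 1 := by unfold pvRank; split <;> omega
        have hphinew : pvPhi (row.getD 1 0 :: row.getD 0 0 :: rest) sl ≤ fuel := by
          have e1 : 3 ^ pvRank (row.getD 0 0) sl ≤ 3 ^ k := Nat.pow_le_pow_right (by omega) hlr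
          have e2 : 3 ^ pvRank (row.getD 1 0) sl ≤ 3 ^ k := Nat.pow_le_pow_right (by omega) hrr
          have e3 : 3 ^ (k + 1) = 3 * 3 ^ k := by ring
          have e4 : 1 ≤ 3 ^ k := Nat.one_le_pow _ _ (by omega)
          rw [pvPhi_cons, hrank, e3] at hphi
          rw [pvPhi_cons, pvPhi_cons]
          omega
        simp only [pvBLoop, if_neg hleaf, hget, hget0, hget1]
        rw [ih _ acc cl sl ?hpre hphinew]
        · have hSj : pvS j cl sl =
              pvS (row.getD 1 0) cl sl ++ pvS (row.getD 0 0) cl sl := by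
            show pvARec (pvRank j sl + 1) j cl sl = _
            rw [hrank, pvARec_succ, if_pos hge, hget]
            simp only [hget0, hget1]
            unfold pvS
            rw [pvARec_stable k _ cl sl (k + 1) (pvRank (row.getD 1 0) sl + 1) hrp hrr (by omega) (by omega),
                pvARec_stable k _ cl sl (k + 1) (pvRank (row.getD 0 0) sl + 1) hlp hlr (by omega) (by omega)]
          simp [hSj]
        · intro x hx
          simp at hx
          rcases hx with rfl | rfl | hx
          · exact hrp
          · exact hlp
          · exact hpre x (by simp [hx])

-- ===== VERDICT (by name: the statement is the Claim_ definition above) =====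
theorem get_cluster_members_spec : Claim_equal_get_cluster_members := by
  intro i cl sl _ hp
  show get_cluster_members i cl sl = get_cluster_members_alt i cl sl
  have hrk : pvRank i sl ≤ cl.length := by
    obtain ⟨h1, h2, _⟩ := hp
    unfold pvRank; split <;> omega
  have hA : get_cluster_members i cl sl = pvS i cl sl := by
    unfold get_cluster_members pvS
    exact pvARec_stable cl.length i cl sl _ _ hp hrk (by omega) (by omega)
  have hphi : pvPhi [i] sl ≤ 3 ^ (cl.length + 1) := by
    have : 3 ^ pvRank i sl ≤ 3 ^ (cl.length + 1) := Nat.pow_le_pow_right (by omega) (by omega)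
    simpa [pvPhi] using this
  have hB : get_cluster_members_alt i cl sl = pvS i cl sl := by
    unfold get_cluster_members_alt
    rw [pvBLoop_spec _ [i] [] cl sl (by intro j hj; simp at hj; subst hj; exact hp) hphi]
    simp
  rw [hA, hB]
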